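-- pv_equiv track=rewrite | github.com/YesselmanLab/rna_secstruct_design | rna_secstruct_design/mutations.py | find_double_mutations
-- ===== SOURCE A (Python) =====
-- def possible_nucleotide_mutations(nucleotide: str) -> list:
--     """
--     Given a RNA nucleotide, returns all possible other nucleotides it could be.
--
--     :param nucleotide: A single RNA nucleotide as a string (must be one of
--     'A', 'U', 'C', 'G').
--     :return: A list of possible other nucleotides as strings.
--     :raises ValueError: If the input nucleotide is not one of the four valid RNA
--     nucleotides ('A', 'U', 'C', 'G').
--     """
--     nucleotides = ["A", "U", "C", "G"]
--     if nucleotide not in nucleotides: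
--         raise ValueError("Invalid nucleotide. Must be one of 'A', 'U', 'C', 'G'.")
--     return [nt for nt in nucleotides if nt != nucleotide]
--
-- def find_double_mutations(sequence: str, exclude: list) -> list:
--     """
--     Given a RNA sequence and a list indicating mutation positions, returns all new
--     sequences with two mutations at different allowed positions.
--
--     :param sequence: A RNA sequence as a string.
--     :param mutation_pos: A list of 1s and 0s indicating the positions in the sequence
--     where mutations are allowed (1) or not allowed (0).
--     :return: A list of new sequences with two mutations at different allowed positions
--     as strings.
--     """
--     result = []
--     for i, nucleotide1 in enumerate(sequence):
--         if i in exclude: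
--             continue
--         for new_nucleotide1 in possible_nucleotide_mutations(nucleotide1):
--             new_sequence1 = sequence[:i] + new_nucleotide1 + sequence[i + 1 :]
--             for j, nucleotide2 in enumerate(new_sequence1):
--                 if j == i or j in exclude:
--                     continue
--                 for new_nucleotide2 in possible_nucleotide_mutations(nucleotide2):
--                     new_sequence2 = (
--                         new_sequence1[:j] + new_nucleotide2 + new_sequence1[j + 1 :]
--                     )
--                     result.append(new_sequence2)
--     return result
-- ===== SOURCE B (Python) =====
-- def find_double_mutations(sequence: str, exclude: list) -> list:
--     # B: build a flat table of single-mutation operations once, then combine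
--     # ordered pairs of distinct-position operations on a char-array copy.
--     nucleotides = "AUCG"
--     ops = []
--     for p, ch in enumerate(sequence):
--         if p in exclude:
--             continue
--         if ch not in nucleotides:
--             raise ValueError("Invalid nucleotide. Must be one of 'A', 'U', 'C', 'G'.")
--         ops.extend((p, nt) for nt in nucleotides if nt != ch)
--     result = []
--     for p1, n1 in ops:
--         for p2, n2 in ops:
--             if p1 == p2:
--                 continue
--             chars = list(sequence)
--             chars[p1] = n1
--             chars[p2] = n2
--             result.append("".join(chars))
--     return result
-- ===== Notes on version B (the rewrite author's own statement) =====
-- stated objective: alternative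
-- what changed: B first builds a flat table of single-mutation operations (position, nucleotide) over the non-excluded positions, then combines every ordered pair of distinct-position operations by setting two cells of a char-array copy, instead of A's four nested loops that rebuild an intermediate mutated string by slicing and rescan it with a second enumerate.
import Mathlib
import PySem

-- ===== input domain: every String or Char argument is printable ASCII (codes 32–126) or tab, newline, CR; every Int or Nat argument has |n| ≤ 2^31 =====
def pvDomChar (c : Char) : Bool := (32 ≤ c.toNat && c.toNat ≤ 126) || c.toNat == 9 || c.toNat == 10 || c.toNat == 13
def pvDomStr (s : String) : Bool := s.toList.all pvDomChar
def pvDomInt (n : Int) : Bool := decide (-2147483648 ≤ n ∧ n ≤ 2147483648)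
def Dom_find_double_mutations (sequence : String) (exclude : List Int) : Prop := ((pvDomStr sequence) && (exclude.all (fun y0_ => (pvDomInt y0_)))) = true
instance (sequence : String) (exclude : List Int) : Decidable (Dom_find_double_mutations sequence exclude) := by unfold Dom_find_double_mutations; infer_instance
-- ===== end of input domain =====

-- B builds the flat table of single-mutation operations once and combines ordered pairs of
-- distinct-position operations on a char-array copy (objective: alternative decomposition).

-- ===== PORT A =====
-- helper of A; its ValueError branch (nucleotide not in the list) is excluded by Pre_find_double_mutations
def possible_nucleotide_mutations (nucleotide : Char) : List Char :=
  (['A', 'U', 'C', 'G']).filter (fun nt => nt ≠ nucleotide)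

def find_double_mutations (sequence : String) (exclude : List Int) : List String :=
  let s := sequence.toList
  (PySem.List.enumerate s).foldl (fun result ic =>
    if ic.1 ∈ exclude then result
    else (possible_nucleotide_mutations ic.2).foldl (fun result m1 =>
      let s1 := PySem.List.slice s none (some ic.1) ++ [m1] ++ PySem.List.slice s (some (ic.1 + 1)) none
      (PySem.List.enumerate s1).foldl (fun result jc =>
        if jc.1 = ic.1 ∨ jc.1 ∈ exclude then result
        else (possible_nucleotide_mutations jc.2).foldl (fun result m2 =>
          result ++ [String.mk (PySem.List.slice s1 none (some jc.1) ++ [m2] ++ PySem.List.slice s1 (some (jc.1 + 1)) none)]) result) result) result) []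

-- ===== PORT B =====
def find_double_mutations_alt (sequence : String) (exclude : List Int) : List String :=
  let s := sequence.toList
  -- the ValueError branch (a non-excluded char outside "AUCG") is excluded by Pre_find_double_mutations
  let ops := (PySem.List.enumerate s).foldl (fun acc pc =>
    if pc.1 ∈ exclude then acc
    else acc ++ ((['A', 'U', 'C', 'G'] : List Char).filter (fun nt => nt ≠ pc.2)).map (fun nt => (pc.1, nt))) ([] : List (Int × Char))
  ops.foldl (fun res o1 =>
    ops.foldl (fun res o2 =>
      if o1.1 = o2.1 then res
      else res ++ [String.mk (PySem.List.pySetD (PySem.List.pySetD s o1.1 o1.2) o2.1 o2.2)]) res) []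

-- ===== PRECONDITION & SPEC =====
-- Pre_ excludes exactly the inputs on which Python A raises ValueError: a position not listed
-- in exclude whose character is not one of 'A','U','C','G'.
def Pre_find_double_mutations (sequence : String) (exclude : List Int) : Prop :=
  ∀ p ∈ PySem.List.enumerate sequence.toList, p.1 ∉ exclude → p.2 ∈ (['A', 'U', 'C', 'G'] : List Char)

instance (sequence : String) (exclude : List Int) : Decidable (Pre_find_double_mutations sequence exclude) := by
  unfold Pre_find_double_mutations; infer_instance

def pvWitness_find_double_mutations : String × List Int := ("AUG", [2])

def Spec_find_double_mutations (sequence : String) (exclude : List Int) (out : List String) : Prop := out = find_double_mutations_alt sequence exclude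
instance (sequence : String) (exclude : List Int) (out : List String) : Decidable (Spec_find_double_mutations sequence exclude out) := by unfold Spec_find_double_mutations; infer_instance

-- ===== CLAIM (what is proved, stated in full; the proofs are below) =====
def Claim_equal_find_double_mutations : Prop := ∀ (sequence : String) (exclude : List Int), Dom_find_double_mutations sequence exclude → Pre_find_double_mutations sequence exclude → Spec_find_double_mutations sequence exclude (find_double_mutations sequence exclude)

-- ===== LEMMAS AND PROOFS =====

-- a loop 'if p(x): continue else out += h(x)' is acc ++ flatMap of the guarded body
theorem pv_foldl_guard {α β : Type} (l : List α) (p : α → Prop) [DecidablePred p]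
    (h : α → List β) (acc : List β) :
    l.foldl (fun a x => if p x then a else a ++ h x) acc
      = acc ++ l.flatMap (fun x => if p x then [] else h x) := by
  rw [← PySem.List.foldl_append_eq_flatMap]
  exact PySem.List.foldl_congr_mem l _ _ acc (by intro a x _; split <;> simp)

-- congruence of flatMap over the enumerations of two equal-length lists
theorem pv_flatMap_enum_congr {α β : Type} (xs ys : List α) (st : Int)
    (f g : Int × α → List β) (hlen : xs.length = ys.length)
    (h : ∀ (k : Nat) (h1 : k < xs.length) (h2 : k < ys.length),
      f (st + (k : Int), xs[k]) = g (st + (k : Int), ys[k])) :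
    (PySem.List.enumerate xs st).flatMap f = (PySem.List.enumerate ys st).flatMap g := by
  induction xs generalizing ys st with
  | nil => cases ys with
    | nil => rfl
    | cons y t => simp at hlen
  | cons x xt ih =>
    cases ys with
    | nil => simp at hlen
    | cons y yt =>
      simp only [PySem.List.enumerate_cons, List.flatMap_cons]
      have h0 := h 0 (by simp) (by simp)
      simp at h0
      rw [h0]
      congr 1
      apply ih yt (st + 1) (by simpa using hlen)
      intro k h1 h2
      have := h (k + 1) (by simpa using h1) (by simpa using h2)
      simpa [add_assoc, add_comm, add_left_comm] using this

-- the slice-built mutation equals List.set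
theorem pv_slices_eq_set {α : Type} (l : List α) (j : Nat) (hj : j < l.length) (x : α) :
    PySem.List.slice l none (some (j : Int)) ++ [x] ++ PySem.List.slice l (some ((j : Int) + 1)) none
      = l.set j x := by
  have h1 : ((j : Int) + 1) = ((j + 1 : Nat) : Int) := by push_cast; ring
  rw [PySem.List.slice_to_natCast, h1, PySem.List.slice_from_natCast]
  simpa using (List.set_eq_take_cons_drop x hj).symm

-- the two ports agree on every character list (the raise case is handled identically by both ports)
theorem pv_main (s : List Char) (ex : List Int) :
    (PySem.List.enumerate s).foldl (fun result ic =>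
      if ic.1 ∈ ex then result
      else (possible_nucleotide_mutations ic.2).foldl (fun result m1 =>
        let s1 := PySem.List.slice s none (some ic.1) ++ [m1] ++ PySem.List.slice s (some (ic.1 + 1)) none
        (PySem.List.enumerate s1).foldl (fun result jc =>
          if jc.1 = ic.1 ∨ jc.1 ∈ ex then result
          else (possible_nucleotide_mutations jc.2).foldl (fun result m2 =>
            result ++ [String.mk (PySem.List.slice s1 none (some jc.1) ++ [m2] ++ PySem.List.slice s1 (some (jc.1 + 1)) none)]) result) result) result) []
    = (let ops := (PySem.List.enumerate s).foldl (fun acc pc =>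
        if pc.1 ∈ ex then acc
        else acc ++ ((['A', 'U', 'C', 'G'] : List Char).filter (fun nt => nt ≠ pc.2)).map (fun nt => (pc.1, nt))) ([] : List (Int × Char))
      ops.foldl (fun res o1 =>
        ops.foldl (fun res o2 =>
          if o1.1 = o2.1 then res
          else res ++ [String.mk (PySem.List.pySetD (PySem.List.pySetD s o1.1 o1.2) o2.1 o2.2)]) res) []) := by
  simp only [PySem.List.foldl_append_singleton_eq_map, pv_foldl_guard, PySem.List.foldl_append_eq_flatMap, List.nil_append]
  rw [List.flatMap_assoc]
  apply pv_flatMap_enum_congr s s 0 _ _ rfl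
  intro k hk _
  simp only [zero_add]
  by_cases hkex : ((k : Int) ∈ ex)
  · simp [hkex]
  · simp only [hkex, ite_false, List.flatMap_map, possible_nucleotide_mutations]
    apply List.flatMap_congr
    intro m1 _
    rw [pv_slices_eq_set s k hk m1]
    rw [List.flatMap_assoc]
    apply pv_flatMap_enum_congr (s.set k m1) s 0 _ _ (by simp)
    intro j hj hj'
    simp only [zero_add]
    by_cases hjex : ((j : Int) ∈ ex)
    · simp [hjex]
    · by_cases hjk : j = k
      · subst hjk
        rw [if_pos (Or.inl rfl), if_neg hjex, List.flatMap_map]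
        symm
        rw [List.flatMap_eq_nil_iff]
        intro x hx
        simp
      · have hne : ¬ ((j : Int) = (k : Int)) := by exact_mod_cast hjk
        have hne' : ¬ ((k : Int) = (j : Int)) := by exact_mod_cast Ne.symm hjk
        rw [if_neg (by simp [hne, hjex])]
        rw [if_neg hjex, List.flatMap_map]
        simp only [hne', ite_false]
        simp only [List.getElem_set_ne (show k ≠ j from Ne.symm hjk)]
        simp only [pv_slices_eq_set (s.set k m1) j hj, PySem.List.pySetD_natCast]
        rw [← List.map_eq_flatMap]

-- ===== VERDICT (by name: the statement is the Claim_ definition above) =====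
theorem find_double_mutations_spec : Claim_equal_find_double_mutations := by
  intro sequence exclude _ _
  unfold Spec_find_double_mutations find_double_mutations find_double_mutations_alt
  exact pv_main sequence.toList exclude
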